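-- pv_equiv track=rewrite | github.com/pypi-data/pypi-mirror-48 | packages/fluxpyt/fluxpyt-0.1.5.tar.gz/fluxpyt-0.1.5/fluxpyt/utility.py | split_rxn
-- ===== SOURCE A (Python) =====
-- def split_rxn(rxn):
--     rxn_split = rxn.split()
--     if len(find(rxn_split,'->')) > 0:
--         rxn_split.remove('->')
--     if len(find(rxn_split,'+')) > 0:
--         while '+' in rxn_split:
--             rxn_split.remove('+')
--     return rxn_split
--
-- def find(a,b,exclude=False):
--     ''' a = list
--         b = item to be found
--     '''
--     ind = []
--     for i in range(len(a)):
--         item = a[i]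
--         if exclude == False:
--             if b == item:
--                 ind.append(i)
--         elif exclude == True:
--             if b != item:
--                 ind.append(i)
--     return ind
-- ===== SOURCE B (Python) =====
-- def split_rxn(rxn):
--     out = []
--     arrow_removed = False
--     for tok in rxn.split():
--         if tok == '->' and not arrow_removed:
--             arrow_removed = True
--         elif tok == '+':
--             pass
--         else:
--             out.append(tok)
--     return out
-- ===== Notes on version B (the rewrite author's own statement) =====
-- stated objective: alternative
-- what changed: Replaces A's index-collecting find() scans plus repeated list.remove calls (a while-loop of linear removals for the plus tokens) with a single linear pass carrying a flag that drops the first arrow token and every plus token.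
import Mathlib
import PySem

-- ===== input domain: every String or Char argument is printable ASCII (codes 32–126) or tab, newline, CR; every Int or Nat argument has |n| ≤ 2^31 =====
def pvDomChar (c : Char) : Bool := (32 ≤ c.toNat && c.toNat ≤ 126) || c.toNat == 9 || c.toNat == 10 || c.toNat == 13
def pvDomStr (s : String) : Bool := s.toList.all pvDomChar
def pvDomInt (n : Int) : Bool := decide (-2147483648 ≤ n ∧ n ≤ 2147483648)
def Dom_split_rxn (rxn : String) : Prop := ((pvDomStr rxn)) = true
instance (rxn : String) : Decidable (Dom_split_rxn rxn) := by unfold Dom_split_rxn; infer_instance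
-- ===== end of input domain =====

-- B replaces A's find() index scans and repeated list.remove calls with one linear pass and a flag.

-- ===== PORT A =====
-- module helper 'find': collects the indices of (non-)matches; the index i is always in
-- range here, so pyGetD with a dummy default is exact for a[i].
def pyFind (a : List String) (b : String) (exclude : Bool) : List Int :=
  (PySem.List.pyRange 0 (a.length : Int) 1).foldl
    (fun ind i =>
      let item := PySem.List.pyGetD a i ""
      if exclude == false then
        (if b == item then ind ++ [i] else ind)
      else if exclude == true then
        (if b != item then ind ++ [i] else ind)
      else ind) []

-- 'while "+" in rxn_split: rxn_split.remove("+")'; remove? is some here since "+" ∈ l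
def removePlusLoop (l : List String) : List String :=
  if h : "+" ∈ l then
    removePlusLoop ((PySem.List.remove? l "+").getD l)
  else l
termination_by l.length
decreasing_by
  rw [PySem.List.remove?_eq_some_erase l "+" h, Option.getD_some,
    List.length_erase_of_mem h]
  have := List.length_pos_of_mem h
  omega

def split_rxn (rxn : String) : List String :=
  let l0 := PySem.Str.split₀ rxn
  let l1 := if (pyFind l0 "->" false).length > 0 then
      (PySem.List.remove? l0 "->").getD l0
    else l0
  let l2 := if (pyFind l1 "+" false).length > 0 then
      removePlusLoop l1
    else l1
  l2

-- ===== PORT B =====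
def goB (l : List String) (arrowRemoved : Bool) : List String :=
  match l with
  | [] => []
  | tok :: ts =>
    if tok == "->" && !arrowRemoved then goB ts true
    else if tok == "+" then goB ts arrowRemoved
    else tok :: goB ts arrowRemoved

def split_rxn_alt (rxn : String) : List String :=
  goB (PySem.Str.split₀ rxn) false

-- ===== PRECONDITION & SPEC =====
def Spec_split_rxn (rxn : String) (out : List String) : Prop := out = split_rxn_alt rxn
instance (rxn : String) (out : List String) : Decidable (Spec_split_rxn rxn out) := by unfold Spec_split_rxn; infer_instance

-- ===== CLAIM (what is proved, stated in full; the proofs are below) =====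
def Claim_equal_split_rxn : Prop := ∀ (rxn : String), Dom_split_rxn rxn → Spec_split_rxn rxn (split_rxn rxn)

-- ===== LEMMAS AND PROOFS =====

lemma pyFind_pos_iff (a : List String) (b : String) :
    0 < (pyFind a b false).length ↔ b ∈ a := by
  have h : pyFind a b false
      = (PySem.List.pyRange 0 (a.length : Int) 1).filter
          (fun i => b == PySem.List.pyGetD a i "") := by
    simpa [pyFind] using
      PySem.List.foldl_append_if_eq_filter
        (p := fun i => b == PySem.List.pyGetD a i "")
        (l := PySem.List.pyRange 0 (a.length : Int) 1) (acc := [])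
  rw [h, List.length_pos_iff]
  constructor
  · intro hne
    obtain ⟨i, hi⟩ := List.exists_mem_of_ne_nil _ hne
    have hi' := List.mem_filter.mp hi
    have hr := (PySem.List.mem_pyRange_one).mp hi'.1
    obtain ⟨k, rfl⟩ : ∃ k : Nat, (k : Int) = i := ⟨i.toNat, by omega⟩
    have hk : k < a.length := by exact_mod_cast hr.2
    have hb := hi'.2
    rw [PySem.List.pyGetD_natCast a k ""] at hb
    rw [List.getD_eq_getElem a "" hk] at hb
    exact (eq_of_beq hb) ▸ List.getElem_mem hk
  · intro hb
    obtain ⟨k, hk, rfl⟩ := List.getElem_of_mem hb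
    apply List.ne_nil_of_mem (a := (k : Int))
    refine List.mem_filter.mpr ⟨?_, ?_⟩
    · exact (PySem.List.mem_pyRange_one).mpr ⟨by omega, by exact_mod_cast hk⟩
    · rw [PySem.List.pyGetD_natCast a k "", List.getD_eq_getElem a "" hk]
      exact beq_self_eq_true _

lemma filter_erase_plus (l : List String) :
    (l.erase "+").filter (fun s => s != "+") = l.filter (fun s => s != "+") := by
  induction l with
  | nil => rfl
  | cons x xs ih =>
    by_cases hx : x = "+"
    · subst hx; simp
    · simp [hx, ih]

lemma removePlusLoop_eq_filter (l : List String) :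
    removePlusLoop l = l.filter (fun s => s != "+") := by
  have H : ∀ n (l : List String), l.length ≤ n →
      removePlusLoop l = l.filter (fun s => s != "+") := by
    intro n
    induction n with
    | zero =>
      intro l hl
      have : l = [] := List.eq_nil_of_length_eq_zero (Nat.le_zero.mp hl)
      subst this
      rw [removePlusLoop]; simp
    | succ n ih =>
      intro l hl
      rw [removePlusLoop]
      split_ifs with h
      · rw [PySem.List.remove?_eq_some_erase l "+" h, Option.getD_some]
        rw [ih _ (by rw [List.length_erase_of_mem h]; omega)]
        exact filter_erase_plus l
      · exact (List.filter_eq_self.mpr (fun x hx => by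
          simp only [bne_iff_ne, ne_eq]
          rintro rfl; exact h hx)).symm
  exact H l.length l le_rfl

lemma goB_true_eq_filter (l : List String) :
    goB l true = l.filter (fun s => s != "+") := by
  induction l with
  | nil => rfl
  | cons t ts ih =>
    by_cases ht : t = "+"
    · subst ht; simp [goB, ih]
    · simp [goB, ht, ih]

lemma goB_false_eq (l : List String) :
    goB l false = (if "->" ∈ l then l.erase "->" else l).filter (fun s => s != "+") := by
  induction l with
  | nil => rfl
  | cons t ts ih =>
    rw [goB]
    by_cases ha : t = "->"
    · subst ha
      simp only [beq_self_eq_true, Bool.not_false, Bool.and_self, if_true]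
      rw [goB_true_eq_filter]
      have hm : ("->" : String) ∈ "->" :: ts := List.mem_cons_self
      rw [if_pos hm, List.erase_cons_head]
    · have hb : (t == "->") = false := by simp [ha]
      have hmem : ("->" ∈ t :: ts) ↔ ("->" ∈ ts) := by
        constructor
        · intro h
          rcases List.mem_cons.mp h with h | h
          · exact absurd h.symm ha
          · exact h
        · exact fun h => List.mem_cons_of_mem _ h
      by_cases hm : "->" ∈ ts
      · have ih' : goB ts false = (ts.erase "->").filter (fun s => s != "+") := by
          rw [ih, if_pos hm]
        rw [if_pos (hmem.mpr hm), List.erase_cons_tail (by simp [ha])]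
        by_cases hp : t = "+"
        · subst hp; simp [hb, ih']
        · simp [hb, hp, ih']
      · have ih' : goB ts false = ts.filter (fun s => s != "+") := by
          rw [ih, if_neg hm]
        rw [if_neg (fun h => hm (hmem.mp h))]
        by_cases hp : t = "+"
        · subst hp; simp [hb, ih']
        · simp [hb, hp, ih']

lemma filter_eq_self_of_not_mem_plus (l : List String) (h : "+" ∉ l) :
    l.filter (fun s => s != "+") = l :=
  List.filter_eq_self.mpr (fun x hx => by
    simp only [bne_iff_ne, ne_eq]
    rintro rfl; exact h hx)

lemma A_core (l : List String) :
    (if (pyFind (if (pyFind l "->" false).length > 0 then (PySem.List.remove? l "->").getD l else l) "+" false).length > 0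
      then removePlusLoop (if (pyFind l "->" false).length > 0 then (PySem.List.remove? l "->").getD l else l)
      else (if (pyFind l "->" false).length > 0 then (PySem.List.remove? l "->").getD l else l))
    = goB l false := by
  rw [goB_false_eq]
  by_cases hm : "->" ∈ l
  · rw [if_pos ((pyFind_pos_iff l "->").mpr hm),
      PySem.List.remove?_eq_some_erase l "->" hm, Option.getD_some, if_pos hm]
    by_cases hp : "+" ∈ l.erase "->"
    · rw [if_pos ((pyFind_pos_iff _ "+").mpr hp), removePlusLoop_eq_filter]
    · have h2 : ¬ (pyFind (l.erase "->") "+" false).length > 0 := by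
        simpa using (pyFind_pos_iff _ "+").not.mpr hp
      rw [if_neg h2, filter_eq_self_of_not_mem_plus _ hp]
  · have h1 : ¬ (pyFind l "->" false).length > 0 := by
      simpa using (pyFind_pos_iff l "->").not.mpr hm
    rw [if_neg h1, if_neg hm]
    by_cases hp : "+" ∈ l
    · rw [if_pos ((pyFind_pos_iff l "+").mpr hp), removePlusLoop_eq_filter]
    · have h2 : ¬ (pyFind l "+" false).length > 0 := by
        simpa using (pyFind_pos_iff l "+").not.mpr hp
      rw [if_neg h2, filter_eq_self_of_not_mem_plus _ hp]

-- ===== VERDICT (by name: the statement is the Claim_ definition above) =====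
theorem split_rxn_spec : Claim_equal_split_rxn := by
  intro rxn _
  show split_rxn rxn = split_rxn_alt rxn
  exact A_core (PySem.Str.split₀ rxn)
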